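-- pv_equiv track=rewrite | github.com/jmbski/lang_tools | backend/conlang_tools/conlang_tools/common/utils.py | get_str_combinations
-- ===== SOURCE A (Python) =====
-- import itertools
--
-- def combine_items(items: list) -> list:
--     """Retrieve all combinations of items from size 1 to len(items)
--
--     Args:
--         items (list): Items to retrieve combinations of
--
--     Returns:
--         list: all combinations
--     """
--
--     new_set = set()
--
--     for i in range(len(items)):
--         new_set.update(itertools.combinations(items, i + 1))
--
--     combs = list(new_set)
--     combs = ["".join(list(c)) for c in combs]
--     return combs
--
-- def get_str_combinations(text: str) -> list[str]:
--     """Return all of the sequential combinations of characters in a string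
--
--     Args:
--         text (str): Text to parse
--
--     Returns:
--         list[str]: Sequential combinations. E.g., "abc" -> ["a","b","ab","bc","abc"]
--     """
--
--     combinations = [c for c in combine_items(list(text)) if c in text]
--     combinations.sort(key=len, reverse=True)
--     groups: list[list[str]] = []
--     group_iters = itertools.groupby(combinations, key=len)
--
--     for _, g in group_iters:
--         groups.append(list(g))
--
--     sorted_combinations = []
--
--     for group in groups:
--         group.sort(key=text.index)
--         sorted_combinations.extend(group)
--
--     return sorted_combinations
-- ===== SOURCE B (Python) =====
-- def get_str_combinations(text: str) -> list[str]:
--     """Return all distinct contiguous substrings, longest first, each at its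
--     first occurrence position: enumerate the O(n^2) slices directly instead of
--     filtering the O(2^n) subsequences."""
--     n = len(text)
--     out = []
--     for length in range(n, 0, -1):
--         for i in range(n - length + 1):
--             s = text[i:i + length]
--             if text.find(s) == i:
--                 out.append(s)
--     return out
-- ===== Notes on version B (the rewrite author's own statement) =====
-- stated objective: faster
-- what changed: B enumerates the O(n^2) contiguous slices directly (longest length first, positions ascending, keeping each substring only at its first occurrence via text.find(s)==i), replacing A's O(2^n) itertools.combinations subsequence enumeration plus substring filter, length sort, groupby and per-group index sort.
import Mathlib
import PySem

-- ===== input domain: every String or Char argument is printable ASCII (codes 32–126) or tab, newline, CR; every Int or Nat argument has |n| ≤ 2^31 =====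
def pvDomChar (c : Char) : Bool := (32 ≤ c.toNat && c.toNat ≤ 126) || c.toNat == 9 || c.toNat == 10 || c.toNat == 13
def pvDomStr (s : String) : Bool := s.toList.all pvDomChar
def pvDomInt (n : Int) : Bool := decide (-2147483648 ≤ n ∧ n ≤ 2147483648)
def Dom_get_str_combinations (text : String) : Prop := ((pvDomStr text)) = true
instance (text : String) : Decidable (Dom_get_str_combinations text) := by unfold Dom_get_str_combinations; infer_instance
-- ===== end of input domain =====

-- B enumerates the O(n^2) contiguous slices directly instead of A's O(2^n) subsequence
-- enumeration; same return value, asymptotically faster.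
-- (A's intermediate list(set) hash order is not modelled by PySem.Set; the final result is
-- independent of it because each length-group is re-sorted by the injective key text.index.)

-- ===== PORT A =====
def combine_items (items : List Char) : List String :=
  let new_set : PySem.Set (List Char) :=
    (List.range items.length).foldl
      (fun s i => PySem.Set.update s (PySem.List.combinations items (i + 1)))
      PySem.Set.empty
  new_set.map (fun c => String.ofList (PySem.Chars.join [] (c.map (fun ch => [ch]))))

-- itertools.groupby(combinations, key=len): adjacent runs of equal length
def pvGroupByLen : List String → List (List String)
  | [] => []
  | x :: xs =>
    (x :: xs.takeWhile (fun y => PySem.Str.len y == PySem.Str.len x)) ::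
      pvGroupByLen (xs.dropWhile (fun y => PySem.Str.len y == PySem.Str.len x))
  termination_by l => l.length
  decreasing_by
    simpa using Nat.lt_succ_of_le (List.length_dropWhile_le _ xs)

def get_str_combinations (text : String) : List String :=
  let combinations :=
    (combine_items text.toList).filter (fun c => PySem.Str.isIn c text)
  let combinations := PySem.List.sorted combinations (fun s => PySem.Str.len s) true
  let groups := pvGroupByLen combinations
  groups.foldl
    (fun sorted_combinations group =>
      sorted_combinations ++ PySem.List.sorted group (fun s => PySem.Str.find text s) false)
    []

-- ===== PORT B =====
def get_str_combinations_alt (text : String) : List String :=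
  let n := PySem.Str.len text
  (PySem.List.pyRange n 0 (-1)).foldl
    (fun out length =>
      (PySem.List.pyRange 0 (n - length + 1) 1).foldl
        (fun out i =>
          let s := PySem.Str.slice text (some i) (some (i + length))
          if PySem.Str.find text s == i then out ++ [s] else out)
        out)
    []

-- ===== PRECONDITION & SPEC =====
def Spec_get_str_combinations (text : String) (out : List String) : Prop := out = get_str_combinations_alt text
instance (text : String) (out : List String) : Decidable (Spec_get_str_combinations text out) := by unfold Spec_get_str_combinations; infer_instance

-- ===== CLAIM (what is proved, stated in full; the proofs are below) =====
def Claim_equal_get_str_combinations : Prop := ∀ (text : String), Dom_get_str_combinations text → Spec_get_str_combinations text (get_str_combinations text)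

-- ===== LEMMAS AND PROOFS =====

-- the length-L slice of t at position i
def pvSub (t : List Char) (i L : Nat) : List Char := (t.drop i).take L

-- the length-L substrings of t, each at its first-occurrence position, positions ascending
def pvBlock (t : List Char) (L : Nat) : List String :=
  ((List.range (t.length + 1 - L)).filter
      (fun i => PySem.Chars.find t (pvSub t i L) == (i : Int))).map
    (fun i => String.ofList (pvSub t i L))

-- blocks for lengths m, m-1, ..., 1
def pvCanon (t : List Char) : Nat → List String
  | 0 => []
  | m + 1 => pvBlock t (m + 1) ++ pvCanon t m

lemma pvStrExt {s u : String} (h : s.toList = u.toList) : s = u := by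
  have := congrArg String.ofList h
  simpa [String.ofList_toList] using this

lemma pvLenSub {t : List Char} {i L : Nat} (h : i + L ≤ t.length) :
    (pvSub t i L).length = L := by
  simp [pvSub, List.length_take, List.length_drop]; omega

lemma pvSub_infix (t : List Char) (i L : Nat) : pvSub t i L <:+: t :=
  List.infix_iff_prefix_suffix.mpr ⟨t.drop i, List.take_prefix _ _, List.drop_suffix _ _⟩

lemma pvInfix_sub {c t : List Char} (h : c <:+: t) :
    ∃ i, i + c.length ≤ t.length ∧ c = pvSub t i c.length := by
  obtain ⟨s, u, rfl⟩ := h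
  refine ⟨s.length, ?_, ?_⟩
  · simp only [List.length_append]; omega
  · show c = pvSub (s ++ c ++ u) s.length c.length
    simp [pvSub, List.append_assoc]

lemma pvDropWhileHead {α : Type} (p : α → Bool) (l : List α) {r : α} {rs : List α}
    (h : l.dropWhile p = r :: rs) : p r = false := by
  induction l with
  | nil => simp [List.dropWhile] at h
  | cons a l ih =>
    rw [List.dropWhile_cons] at h
    by_cases hp : p a = true
    · rw [if_pos hp] at h; exact ih h
    · rw [if_neg hp] at h
      injection h with h1 _
      subst h1
      simpa using hp

lemma pvGroupByLen_cons (x : String) (xs : List String) :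
    pvGroupByLen (x :: xs) =
      (x :: xs.takeWhile (fun y => PySem.Str.len y == PySem.Str.len x)) ::
        pvGroupByLen (xs.dropWhile (fun y => PySem.Str.len y == PySem.Str.len x)) := by
  rw [pvGroupByLen]

-- a string is in combine_items t iff it is a nonempty sublist (subsequence) of t
lemma pvMemCombine (t : List Char) (x : String) :
    x ∈ combine_items t ↔ ∃ c, c.Sublist t ∧ c ≠ [] ∧ x = String.ofList c := by
  have hfold : ∀ (k : Nat) (y : List Char),
      y ∈ (List.range k).foldl
          (fun s i => PySem.Set.update s (PySem.List.combinations t (i + 1)))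
          PySem.Set.empty ↔ ∃ i < k, y ∈ PySem.List.combinations t (i + 1) := by
    intro k y
    induction k with
    | zero => simp [PySem.Set.empty]
    | succ k ih =>
      rw [List.range_succ, List.foldl_append]
      simp only [List.foldl_cons, List.foldl_nil, PySem.Set.mem_update, ih,
        Nat.lt_succ_iff_lt_or_eq]
      constructor
      · rintro (⟨i, hi, hm⟩ | hm)
        · exact ⟨i, Or.inl hi, hm⟩
        · exact ⟨k, Or.inr rfl, hm⟩
      · rintro ⟨i, hi | rfl, hm⟩
        · exact Or.inl ⟨i, hi, hm⟩
        · exact Or.inr hm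
  unfold combine_items
  simp only [List.mem_map, hfold, PySem.List.mem_combinations_iff,
    PySem.Chars.join_nil_singletons]
  constructor
  · rintro ⟨c, ⟨i, hi, hsub, hlen⟩, rfl⟩
    refine ⟨c, hsub, ?_, rfl⟩
    rintro rfl
    simp at hlen
  · rintro ⟨c, hsub, hne, rfl⟩
    have hlen : 1 ≤ c.length := by
      cases c with
      | nil => simp at hne
      | cons a l => simp
    exact ⟨c, ⟨c.length - 1, by have := hsub.length_le; omega, hsub, by omega⟩, rfl⟩

lemma pvNodupCombine (t : List Char) : (combine_items t).Nodup := by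
  have hnd : ∀ (k : Nat),
      ((List.range k).foldl
          (fun s i => PySem.Set.update s (PySem.List.combinations t (i + 1)))
          PySem.Set.empty).Nodup := by
    intro k
    induction k with
    | zero => simp [PySem.Set.empty]
    | succ k ih =>
      rw [List.range_succ, List.foldl_append]
      exact PySem.Set.nodup_update _ _ ih
  unfold combine_items
  refine List.Nodup.map_on ?_ (hnd _)
  intro a _ b _ h
  simpa [PySem.Chars.join_nil_singletons] using congrArg String.toList h

-- membership in A's filtered-and-sorted list: exactly the nonempty infixes of t
lemma pvMemSorted (text : String) (x : String) :
    x ∈ PySem.List.sorted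
        ((combine_items text.toList).filter (fun c => PySem.Str.isIn c text))
        (fun s => PySem.Str.len s) true ↔
      x.toList ≠ [] ∧ x.toList <:+: text.toList := by
  rw [PySem.List.mem_sorted, List.mem_filter, pvMemCombine]
  constructor
  · rintro ⟨⟨c, _, hne, rfl⟩, hin⟩
    rw [PySem.Str.isIn_iff_infix] at hin
    exact ⟨by simpa using hne, hin⟩
  · rintro ⟨hne, hin⟩
    refine ⟨⟨x.toList, hin.sublist, hne, ?_⟩, (PySem.Str.isIn_iff_infix _ _).mpr hin⟩
    exact pvStrExt (by simp)

lemma pvNodupSorted (text : String) :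
    (PySem.List.sorted
        ((combine_items text.toList).filter (fun c => PySem.Str.isIn c text))
        (fun s => PySem.Str.len s) true).Nodup :=
  ((PySem.List.sorted_perm _ _ _).nodup_iff).mpr
    (List.Nodup.filter _ (pvNodupCombine _))

lemma pvMemBlock (t : List Char) (L : Nat) (y : String) :
    y ∈ pvBlock t L ↔
      ∃ i, i + L ≤ t.length ∧ PySem.Chars.find t (pvSub t i L) = (i : Int) ∧
        y = String.ofList (pvSub t i L) := by
  unfold pvBlock
  simp only [List.mem_map, List.mem_filter, List.mem_range, beq_iff_eq]
  constructor
  · rintro ⟨i, ⟨hi, hf⟩, rfl⟩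
    exact ⟨i, by omega, hf, rfl⟩
  · rintro ⟨i, hi, hf, rfl⟩
    exact ⟨i, ⟨by omega, hf⟩, rfl⟩

lemma pvNodupBlock (t : List Char) (L : Nat) : (pvBlock t L).Nodup := by
  unfold pvBlock
  refine List.Nodup.map_on ?_ (List.Nodup.filter _ List.nodup_range)
  intro a ha b hb h
  simp only [List.mem_filter, beq_iff_eq] at ha hb
  have hab : pvSub t a L = pvSub t b L := by
    simpa [String.toList_ofList] using congrArg String.toList h
  have := ha.2.symm.trans ((congrArg (PySem.Chars.find t) hab).trans hb.2)
  exact_mod_cast this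

lemma pvPairwiseBlock (text : String) (L : Nat) :
    (pvBlock text.toList L).Pairwise
      (fun a b => PySem.Str.find text a < PySem.Str.find text b) := by
  unfold pvBlock
  rw [List.pairwise_map]
  refine List.Pairwise.imp_of_mem ?_
    (List.Pairwise.filter _ List.pairwise_lt_range)
  intro a b ha hb hab
  simp only [List.mem_filter, beq_iff_eq] at ha hb
  simp only [PySem.Str.find_eq, String.toList_ofList, ha.2, hb.2]
  exact_mod_cast hab

-- every length-L infix, seen as a string, is a canonical (first-occurrence) block element
lemma pvToBlockForm (text : String) {y : String} {L i : Nat} (hL : 1 ≤ L)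
    (hiL : i + L ≤ text.toList.length) (hy : y.toList = pvSub text.toList i L) :
    ∃ j, j + L ≤ text.toList.length ∧
      PySem.Chars.find text.toList (pvSub text.toList j L) = (j : Int) ∧
      y = String.ofList (pvSub text.toList j L) := by
  set t := text.toList with ht
  have hinf : y.toList <:+: t := hy ▸ pvSub_infix t i L
  have hnn : 0 ≤ PySem.Chars.find t y.toList :=
    (PySem.Chars.find_nonneg_iff t y.toList).mpr hinf
  set j := (PySem.Chars.find t y.toList).toNat with hj
  have hspec := PySem.Chars.find_spec hnn
  have hpre : y.toList <+: t.drop j := hspec.1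
  have hylen : y.toList.length = L := by rw [hy]; exact pvLenSub hiL
  have hsub : y.toList = pvSub t j L := by
    have := List.prefix_iff_eq_take.mp hpre
    rw [hylen] at this
    simpa [pvSub] using this
  have hjL : j + L ≤ t.length := by
    have h1 := hpre.length_le
    rw [hylen, List.length_drop] at h1
    omega
  refine ⟨j, hjL, ?_, ?_⟩
  · rw [← hsub, hj, Int.toNat_of_nonneg hnn]
  · exact pvStrExt (by rw [String.toList_ofList, ← hsub])

-- MAIN: A's groupby-then-sort pipeline, applied to a nodup length-descending list holding
-- exactly the substrings of lengths 1..m, yields the canonical block list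
lemma pvMain (text : String) : ∀ (m : Nat) (l : List String),
    m ≤ text.toList.length → l.Nodup →
    l.Pairwise (fun a b => PySem.Str.len b ≤ PySem.Str.len a) →
    (∀ x, x ∈ l ↔ ∃ L i, 1 ≤ L ∧ L ≤ m ∧ i + L ≤ text.toList.length ∧
        x.toList = pvSub text.toList i L) →
    (pvGroupByLen l).flatMap
        (fun g => PySem.List.sorted g (fun s => PySem.Str.find text s) false)
      = pvCanon text.toList m := by
  intro m
  induction m with
  | zero =>
    intro l _ _ _ hmem
    have hl : l = [] := by
      rw [List.eq_nil_iff_forall_not_mem]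
      intro x hx
      obtain ⟨L, i, h1, h2, _, _⟩ := (hmem x).mp hx
      omega
    subst hl
    rw [pvGroupByLen]
    rfl
  | succ m ih =>
    intro l hm hnd hpw hmem
    have hx0 : String.ofList (pvSub text.toList 0 (m + 1)) ∈ l :=
      (hmem _).mpr ⟨m + 1, 0, by omega, by omega, by omega,
        by rw [String.toList_ofList]⟩
    have hlenEq : ∀ y ∈ l, ∃ (L : Nat), 1 ≤ L ∧ L ≤ m + 1 ∧
        PySem.Str.len y = (L : Int) := by
      intro y hy
      obtain ⟨L, i, h1, h2, h3, h4⟩ := (hmem y).mp hy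
      exact ⟨L, h1, h2, by rw [PySem.Str.len_eq, h4, pvLenSub h3]⟩
    have hlen0 : PySem.Str.len (String.ofList (pvSub text.toList 0 (m + 1)))
        = ((m + 1 : Nat) : Int) := by
      rw [PySem.Str.len_eq, String.toList_ofList, pvLenSub (by omega)]
    cases l with
    | nil => exact absurd hx0 (by simp)
    | cons x xs =>
      have hxtop : ∀ y ∈ x :: xs, PySem.Str.len y ≤ PySem.Str.len x := by
        intro y hy
        rcases List.mem_cons.mp hy with rfl | hy'
        · exact le_refl _
        · exact (List.pairwise_cons.mp hpw).1 y hy'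
      have hxlen : PySem.Str.len x = ((m + 1 : Nat) : Int) := by
        have h1 := hxtop _ hx0
        rw [hlen0] at h1
        obtain ⟨L, hL1, hL2, hL3⟩ := hlenEq x (by simp)
        rw [hL3] at h1 ⊢
        have : L = m + 1 := by
          have h2 : (m + 1 : Nat) ≤ L := by exact_mod_cast h1
          omega
        rw [this]
      have hg_sub : (x :: xs.takeWhile (fun y => PySem.Str.len y == PySem.Str.len x)).Sublist
          (x :: xs) :=
        List.cons_sublist_cons.mpr (List.takeWhile_sublist _)
      have hrest_sub : (xs.dropWhile (fun y => PySem.Str.len y == PySem.Str.len x)).Sublist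
          (x :: xs) :=
        (List.dropWhile_sublist _).cons _
      have hg_len : ∀ y ∈ x :: xs.takeWhile (fun y => PySem.Str.len y == PySem.Str.len x),
          PySem.Str.len y = ((m + 1 : Nat) : Int) := by
        intro y hy
        rcases List.mem_cons.mp hy with rfl | hy'
        · exact hxlen
        · have := List.mem_takeWhile_imp hy'
          rw [beq_iff_eq] at this
          rw [this, hxlen]
      have hrest_le : ∀ y ∈ xs.dropWhile (fun y => PySem.Str.len y == PySem.Str.len x),
          PySem.Str.len y ≤ ((m : Nat) : Int) := by
        cases hre : xs.dropWhile (fun y => PySem.Str.len y == PySem.Str.len x) with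
        | nil => intro y hy; simp at hy
        | cons r rs =>
          have hpr : (PySem.Str.len r == PySem.Str.len x) = false :=
            pvDropWhileHead _ xs hre
          have hrl : r ∈ x :: xs := hrest_sub.subset (by rw [hre]; simp)
          have hr_le : PySem.Str.len r ≤ ((m : Nat) : Int) := by
            obtain ⟨L, h1, h2, h3⟩ := hlenEq r hrl
            have hne : PySem.Str.len r ≠ PySem.Str.len x := by
              simpa using hpr
            rw [h3, hxlen] at hne
            rw [h3]
            have : L ≠ m + 1 := by exact_mod_cast hne
            exact_mod_cast (by omega : L ≤ m)
          intro y hy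
          rcases List.mem_cons.mp hy with rfl | hy'
          · exact hr_le
          · have hpwrest := List.Pairwise.sublist hrest_sub hpw
            rw [hre] at hpwrest
            exact le_trans ((List.pairwise_cons.mp hpwrest).1 y hy') hr_le
      have hsplit : x :: xs
          = (x :: xs.takeWhile (fun y => PySem.Str.len y == PySem.Str.len x))
            ++ xs.dropWhile (fun y => PySem.Str.len y == PySem.Str.len x) := by
        simp [List.takeWhile_append_dropWhile]
      have hmem_rest : ∀ y, y ∈ xs.dropWhile (fun y => PySem.Str.len y == PySem.Str.len x) ↔
          ∃ L i, 1 ≤ L ∧ L ≤ m ∧ i + L ≤ text.toList.length ∧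
            y.toList = pvSub text.toList i L := by
        intro y
        constructor
        · intro hy
          obtain ⟨L, i, h1, h2, h3, h4⟩ := (hmem y).mp (hrest_sub.subset hy)
          have hylen : PySem.Str.len y = (L : Int) := by
            rw [PySem.Str.len_eq, h4, pvLenSub h3]
          have := hrest_le y hy
          rw [hylen] at this
          have hLm : L ≤ m := by exact_mod_cast this
          exact ⟨L, i, h1, hLm, h3, h4⟩
        · rintro ⟨L, i, h1, h2, h3, h4⟩
          have hyl : y ∈ x :: xs := (hmem y).mpr ⟨L, i, h1, by omega, h3, h4⟩
          have hylen : PySem.Str.len y = (L : Int) := by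
            rw [PySem.Str.len_eq, h4, pvLenSub h3]
          rcases List.mem_append.mp (hsplit ▸ hyl) with h | h
          · exfalso
            have := hg_len y h
            rw [hylen] at this
            have : L = m + 1 := by exact_mod_cast this
            omega
          · exact h
      have hmem_g : ∀ y, y ∈ x :: xs.takeWhile (fun y => PySem.Str.len y == PySem.Str.len x) ↔
          (y ∈ x :: xs ∧ PySem.Str.len y = ((m + 1 : Nat) : Int)) := by
        intro y
        constructor
        · intro hy
          exact ⟨hg_sub.subset hy, hg_len y hy⟩
        · rintro ⟨hyl, hylen⟩
          rcases List.mem_append.mp (hsplit ▸ hyl) with h | h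
          · exact h
          · exfalso
            have := hrest_le y h
            rw [hylen] at this
            have : (m + 1 : Nat) ≤ m := by exact_mod_cast this
            omega
      have hperm : (pvBlock text.toList (m + 1)).Perm
          (x :: xs.takeWhile (fun y => PySem.Str.len y == PySem.Str.len x)) := by
        rw [List.perm_ext_iff_of_nodup (pvNodupBlock _ _) (List.Nodup.sublist hg_sub hnd)]
        intro y
        rw [pvMemBlock, hmem_g]
        constructor
        · rintro ⟨i, hi, hf, rfl⟩
          refine ⟨(hmem _).mpr ⟨m + 1, i, by omega, by omega, hi, by rw [String.toList_ofList]⟩, ?_⟩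
          rw [PySem.Str.len_eq, String.toList_ofList, pvLenSub hi]
        · rintro ⟨hyl, hylen⟩
          obtain ⟨L, i, h1, h2, h3, h4⟩ := (hmem y).mp hyl
          have hLm : L = m + 1 := by
            have hyL : PySem.Str.len y = (L : Int) := by
              rw [PySem.Str.len_eq, h4, pvLenSub h3]
            rw [hylen] at hyL
            exact_mod_cast hyL.symm
          subst hLm
          exact pvToBlockForm text (by omega) h3 h4
      have hsorted_g : PySem.List.sorted
            (x :: xs.takeWhile (fun y => PySem.Str.len y == PySem.Str.len x))
            (fun s => PySem.Str.find text s) false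
          = pvBlock text.toList (m + 1) :=
        PySem.List.sorted_eq_of_perm_of_pairwise_lt _ _ _ hperm (pvPairwiseBlock text (m + 1))
      have hrec := ih (xs.dropWhile (fun y => PySem.Str.len y == PySem.Str.len x))
        (by omega) (List.Nodup.sublist hrest_sub hnd)
        (List.Pairwise.sublist hrest_sub hpw) hmem_rest
      rw [pvGroupByLen_cons, List.flatMap_cons, hsorted_g, hrec]
      rfl

-- membership in A's sorted list, in block form (m = full length)
lemma pvMemSortedForm (text : String) (x : String) :
    x ∈ PySem.List.sorted
        ((combine_items text.toList).filter (fun c => PySem.Str.isIn c text))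
        (fun s => PySem.Str.len s) true ↔
      ∃ L i, 1 ≤ L ∧ L ≤ text.toList.length ∧ i + L ≤ text.toList.length ∧
        x.toList = pvSub text.toList i L := by
  rw [pvMemSorted]
  constructor
  · rintro ⟨hne, hinf⟩
    obtain ⟨i, hi, heq⟩ := pvInfix_sub hinf
    refine ⟨x.toList.length, i, ?_, by omega, hi, heq⟩
    cases hxl : x.toList with
    | nil => exact absurd hxl hne
    | cons a l => simp
  · rintro ⟨L, i, h1, h2, h3, h4⟩
    have hlen : x.toList.length = L := by rw [h4]; exact pvLenSub h3
    constructor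
    · intro hnil
      rw [hnil] at hlen
      simp at hlen
      omega
    · rw [h4]; exact pvSub_infix _ _ _

lemma pvACanon (text : String) :
    get_str_combinations text = pvCanon text.toList text.toList.length := by
  have h0 : get_str_combinations text
      = (pvGroupByLen (PySem.List.sorted
          ((combine_items text.toList).filter (fun c => PySem.Str.isIn c text))
          (fun s => PySem.Str.len s) true)).foldl
          (fun acc g => acc ++ PySem.List.sorted g (fun s => PySem.Str.find text s) false)
          [] := rfl
  rw [h0, PySem.List.foldl_append_eq_flatMap, List.nil_append]
  exact pvMain text _ _ le_rfl (pvNodupSorted text)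
    (PySem.List.sorted_pairwise_rev _ _) (pvMemSortedForm text)

lemma pvAltAux (text : String) : ∀ (m : Nat), m ≤ text.toList.length →
    (PySem.List.pyRange (m : Int) 0 (-1)).flatMap
      (fun L => ((PySem.List.pyRange 0 ((text.toList.length : Int) - L + 1) 1).filter
          (fun i => PySem.Str.find text (PySem.Str.slice text (some i) (some (i + L))) == i)).map
        (fun i => PySem.Str.slice text (some i) (some (i + L))))
      = pvCanon text.toList m := by
  intro m
  induction m with
  | zero =>
    intro _
    have h : PySem.List.pyRange ((0 : Nat) : Int) 0 (-1) = [] :=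
      PySem.List.pyRange_neg_one_eq_nil (by norm_num)
    rw [h]
    rfl
  | succ m ih =>
    intro hm
    rw [PySem.List.pyRange_neg_one_cons (by exact_mod_cast Nat.succ_pos m)]
    have hcast : ((m + 1 : Nat) : Int) - 1 = (m : Int) := by push_cast; ring
    rw [hcast, List.flatMap_cons, ih (by omega)]
    have hslice : ∀ (i : Nat),
        (PySem.Str.slice text (some (i : Int)) (some ((i : Int) + ((m + 1 : Nat) : Int)))).toList
          = pvSub text.toList i (m + 1) := by
      intro i
      rw [PySem.Str.toList_slice, PySem.Chars.slice_eq_listSlice]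
      exact PySem.List.slice_natCast_add text.toList i (m + 1)
    have hrange : (text.toList.length : Int) - ((m + 1 : Nat) : Int) + 1
        = ((text.toList.length + 1 - (m + 1) : Nat) : Int) := by omega
    have hblock :
        ((PySem.List.pyRange 0 ((text.toList.length : Int) - ((m + 1 : Nat) : Int) + 1) 1).filter
            (fun i => PySem.Str.find text
              (PySem.Str.slice text (some i) (some (i + ((m + 1 : Nat) : Int)))) == i)).map
          (fun i => PySem.Str.slice text (some i) (some (i + ((m + 1 : Nat) : Int))))
        = pvBlock text.toList (m + 1) := by
      rw [hrange, PySem.List.pyRange_zero_nat, List.filter_map, List.map_map]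
      unfold pvBlock
      have hf : List.filter ((fun i => PySem.Str.find text
              (PySem.Str.slice text (some i) (some (i + ((m + 1 : Nat) : Int)))) == i)
            ∘ fun (k : Nat) => (k : Int)) (List.range (text.toList.length + 1 - (m + 1)))
          = List.filter (fun i => PySem.Chars.find text.toList (pvSub text.toList i (m + 1))
              == (i : Int)) (List.range (text.toList.length + 1 - (m + 1))) :=
        List.filter_congr (by
          intro i _
          simp only [Function.comp_apply, PySem.Str.find_eq, hslice])
      rw [hf]
      apply List.map_congr_left
      intro i _
      simp only [Function.comp_apply]
      exact pvStrExt (by rw [hslice, String.toList_ofList])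
    rw [hblock]
    rfl

lemma pvAltCanon (text : String) :
    get_str_combinations_alt text = pvCanon text.toList text.toList.length := by
  have h0 : get_str_combinations_alt text
      = (PySem.List.pyRange (PySem.Str.len text) 0 (-1)).foldl
          (fun out length =>
            (PySem.List.pyRange 0 (PySem.Str.len text - length + 1) 1).foldl
              (fun out i =>
                if PySem.Str.find text (PySem.Str.slice text (some i) (some (i + length))) == i
                then out ++ [PySem.Str.slice text (some i) (some (i + length))] else out)
              out)
          [] := rfl
  rw [h0]
  simp only [PySem.List.foldl_append_if]
  rw [PySem.List.foldl_append_eq_flatMap, List.nil_append, PySem.Str.len_eq]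
  exact pvAltAux text text.toList.length le_rfl

-- ===== VERDICT (by name: the statement is the Claim_ definition above) =====
theorem get_str_combinations_spec : Claim_equal_get_str_combinations := by
  intro text _
  unfold Spec_get_str_combinations
  rw [pvACanon, pvAltCanon]
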